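-- pv_equiv track=rewrite | github.com/phai-lab/EgoHOI | infer.py | split_tasks_among_workers
-- ===== SOURCE A (Python) =====
-- from typing import Any, Dict, List, Optional, Sequence
--
-- def split_tasks_among_workers(tasks: Sequence[Dict[str, Any]], num_workers: int) -> List[List[Dict[str, Any]]]:
--     total_tasks = len(tasks)
--     if total_tasks == 0:
--         return [[]]
--     if num_workers <= 1:
--         return [list(tasks)]
--     effective_workers = min(num_workers, total_tasks)
--     base = total_tasks // effective_workers
--     remainder = total_tasks % effective_workers
--
--     result: List[List[Dict[str, Any]]] = []
--     start = 0
--     for idx in range(effective_workers):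
--         extra = 1 if idx < remainder else 0
--         end = start + base + extra
--         result.append(list(tasks[start:end]))
--         start = end
--     return result
-- ===== SOURCE B (Python) =====
-- from typing import Any, Dict, List, Optional, Sequence
--
-- def split_tasks_among_workers(tasks: Sequence[Dict[str, Any]], num_workers: int) -> List[List[Dict[str, Any]]]:
--     items = list(tasks)
--     if not items:
--         return [[]]
--     if num_workers <= 1:
--         return [items]
--     # greedy peeling: give each remaining worker the ceiling of the remaining
--     # per-worker share; this yields the same balanced contiguous chunks without
--     # precomputing base/remainder.
--     workers = min(num_workers, len(items))
--     result: List[List[Dict[str, Any]]] = []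
--     while workers > 0:
--         size = -(-len(items) // workers)  # ceil division of what is left
--         result.append(items[:size])
--         items = items[size:]
--         workers -= 1
--     return result
-- ===== Notes on version B (the rewrite author's own statement) =====
-- stated objective: alternative
-- what changed: Replaced the precomputed base/remainder partition with a greedy peeling loop that repeatedly gives the next worker the ceiling of remaining_tasks/remaining_workers and recurses on the rest; no base, remainder or per-index arithmetic remains.
import Mathlib
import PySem

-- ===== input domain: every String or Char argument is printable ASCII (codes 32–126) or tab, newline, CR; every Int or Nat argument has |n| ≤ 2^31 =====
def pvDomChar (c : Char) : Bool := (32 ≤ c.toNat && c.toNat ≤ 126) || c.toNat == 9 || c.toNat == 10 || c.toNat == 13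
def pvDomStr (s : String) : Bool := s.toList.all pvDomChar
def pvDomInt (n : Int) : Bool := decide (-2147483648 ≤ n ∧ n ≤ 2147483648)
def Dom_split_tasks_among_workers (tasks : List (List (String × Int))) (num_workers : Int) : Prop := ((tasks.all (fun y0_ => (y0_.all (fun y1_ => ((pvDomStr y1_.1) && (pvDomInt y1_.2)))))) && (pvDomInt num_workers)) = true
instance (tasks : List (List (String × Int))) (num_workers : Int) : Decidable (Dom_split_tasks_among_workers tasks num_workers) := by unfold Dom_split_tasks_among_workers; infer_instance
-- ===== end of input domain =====

-- B replaces A's base/remainder running-start loop with greedy peeling: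
-- each step hands the next worker ceil(remaining/len-of-remaining-workers)
-- tasks and continues on the rest (alternative decomposition, same cost).


-- ===== PORT A =====
def split_tasks_among_workers (tasks : List (List (String × Int))) (num_workers : Int) : List (List (List (String × Int))) :=
  let total_tasks : Int := tasks.length
  if total_tasks = 0 then [[]]
  else if num_workers ≤ 1 then [tasks]
  else
    let effective_workers := min num_workers total_tasks
    let base := PySem.Int.floordiv total_tasks effective_workers
    let remainder := PySem.Int.mod total_tasks effective_workers
    ((PySem.List.pyRange 0 effective_workers 1).foldl
      (fun (acc : List (List (List (String × Int))) × Int) idx =>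
        let extra : Int := if idx < remainder then 1 else 0
        let e := acc.2 + base + extra
        (acc.1 ++ [PySem.List.slice tasks (some acc.2) (some e)], e))
      ([], 0)).1

-- ===== PORT B =====
-- the 'while workers > 0' loop of Source B: fuel = current value of 'workers'
def pvAltLoop (items : List (List (String × Int))) : Nat → List (List (List (String × Int)))
  | 0 => []
  | w + 1 =>
    let size : Int := -(PySem.Int.floordiv (-(items.length : Int)) ((w : Int) + 1))
    PySem.List.slice items none (some size) ::
      pvAltLoop (PySem.List.slice items (some size) none) w

def split_tasks_among_workers_alt (tasks : List (List (String × Int))) (num_workers : Int) : List (List (List (String × Int))) :=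
  if tasks = [] then [[]]
  else if num_workers ≤ 1 then [tasks]
  else pvAltLoop tasks (min num_workers (tasks.length : Int)).toNat

-- ===== PRECONDITION & SPEC =====
def Spec_split_tasks_among_workers (tasks : List (List (String × Int))) (num_workers : Int) (out : List (List (List (String × Int)))) : Prop := out = split_tasks_among_workers_alt tasks num_workers
instance (tasks : List (List (String × Int))) (num_workers : Int) (out : List (List (List (String × Int)))) : Decidable (Spec_split_tasks_among_workers tasks num_workers out) := by unfold Spec_split_tasks_among_workers; infer_instance

-- ===== CLAIM (what is proved, stated in full; the proofs are below) =====
def Claim_equal_split_tasks_among_workers : Prop := ∀ (tasks : List (List (String × Int))) (num_workers : Int), Dom_split_tasks_among_workers tasks num_workers → Spec_split_tasks_among_workers tasks num_workers (split_tasks_among_workers tasks num_workers)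

-- ===== LEMMAS AND PROOFS =====

-- A's fold with a running start equals the closed-form chunk map.
theorem pv_foldl_chunks (tasks : List (List (String × Int))) (base r : Int) :
    ∀ (n : Nat) (a : Int) (res : List (List (List (String × Int)))),
    ((PySem.List.pyRange a (a + n) 1).foldl
      (fun (acc : List (List (List (String × Int))) × Int) idx =>
        let extra : Int := if idx < r then 1 else 0
        let e := acc.2 + base + extra
        (acc.1 ++ [PySem.List.slice tasks (some acc.2) (some e)], e))
      (res, a * base + min a r)).1
    = res ++ (PySem.List.pyRange a (a + n) 1).map
        (fun idx => PySem.List.slice tasks (some (idx * base + min idx r))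
                      (some ((idx + 1) * base + min (idx + 1) r))) := by
  intro n
  induction n with
  | zero =>
    intro a res
    rw [PySem.List.pyRange_one_eq_nil (by omega)]
    simp
  | succ n ih =>
    intro a res
    rw [PySem.List.pyRange_one_cons (by omega : a < a + (n + 1 : Nat))]
    simp only [List.foldl_cons, List.map_cons]
    have hstart : a * base + min a r + base + (if a < r then (1:Int) else 0)
        = (a + 1) * base + min (a + 1) r := by
      split_ifs with h <;> (simp [Int.add_mul]; omega)
    rw [show a + ((n + 1 : Nat) : Int) = (a + 1) + (n : Int) by push_cast; ring]
    simp only [hstart]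
    rw [ih (a + 1) (res ++ [PySem.List.slice tasks (some (a * base + min a r)) (some ((a + 1) * base + min (a + 1) r))])]
    simp

-- Python's -(-n // k) is ceiling division, expressed through n / k and n % k.
theorem pv_ceil (n k : Nat) (hk : 0 < k) :
    -(PySem.Int.floordiv (-(n : Int)) (k : Int))
      = ((n / k + if n % k = 0 then 0 else 1 : Nat) : Int) := by
  rw [PySem.Int.neg_floordiv_neg_eq_iff_of_pos (by exact_mod_cast hk)]
  have h1 : n % k < k := Nat.mod_lt _ hk
  have h2 : k * (n / k) + n % k = n := Nat.div_add_mod n k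
  have h2' : (k : Int) * ((n / k : Nat) : Int) + ((n % k : Nat) : Int) = (n : Int) := by
    exact_mod_cast h2
  have h1' : ((n % k : Nat) : Int) < (k : Int) := by exact_mod_cast h1
  have hk' : (0 : Int) < (k : Int) := by exact_mod_cast hk
  have hD : (0 : Int) ≤ ((n / k : Nat) : Int) := Int.natCast_nonneg _
  rcases Nat.eq_zero_or_pos (n % k) with h | h
  · have hM : ((n % k : Nat) : Int) = 0 := by exact_mod_cast h
    rw [if_pos h, Nat.add_zero]
    constructor
    · nlinarith
    · nlinarith
  · have hM : (0 : Int) < ((n % k : Nat) : Int) := by exact_mod_cast h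
    rw [if_neg (by omega : ¬ n % k = 0)]
    push_cast [Nat.cast_add]
    constructor
    · nlinarith
    · nlinarith

-- B's greedy peeling equals the closed-form chunk map (Nat indices).
theorem pv_greedy : ∀ (m : Nat) (items : List (List (String × Int))), 0 < m → m ≤ items.length →
    pvAltLoop items m = (List.range m).map (fun j =>
      (items.drop (j * (items.length / m) + min j (items.length % m))).take
        (items.length / m + if j < items.length % m then 1 else 0)) := by
  intro m
  induction m with
  | zero => intro _ h; omega
  | succ mm ih =>
    intro items _ hle
    set n := items.length with hn
    set b := n / (mm + 1) with hb
    set rN := n % (mm + 1) with hr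
    have hmod : rN < mm + 1 := Nat.mod_lt _ (by omega)
    have hdm : (mm + 1) * b + rN = n := Nat.div_add_mod n (mm + 1)
    have hmb : (mm + 1) * b = mm * b + b := by ring
    have hb1 : 1 ≤ b := (Nat.one_le_div_iff (by omega)).mpr hle
    have hsz : -(PySem.Int.floordiv (-(items.length : Int)) ((mm : Int) + 1))
        = ((b + if rN = 0 then 0 else 1 : Nat) : Int) := by
      rw [show ((mm : Int) + 1) = ((mm + 1 : Nat) : Int) by push_cast; ring]
      rw [← hn]; exact pv_ceil n (mm + 1) (by omega)
    set sz := b + (if rN = 0 then 0 else 1) with hszdef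
    have hszn : sz ≤ n := by
      rcases Nat.eq_zero_or_pos rN with h | h
      · simp only [hszdef, if_pos h]; omega
      · simp only [hszdef, if_neg (by omega : ¬ rN = 0)]; omega
    simp only [pvAltLoop, hsz, PySem.List.slice_to_natCast, PySem.List.slice_from_natCast]
    rcases Nat.eq_zero_or_pos mm with hmm | hmm
    · -- last worker: takes everything
      subst hmm
      have hr0 : rN = 0 := by omega
      have hbn : b = n := by omega
      have hszn' : sz = n := by simp [hszdef, hr0, hbn]
      simp [pvAltLoop, hszn', hr0, hbn]
    · -- at least two workers remain
      have hrest : (items.drop sz).length = n - sz := by simp [hn]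
      -- divmod of the remaining count by the remaining workers
      have hn2 : n - sz = mm * b + (rN - 1) := by
        rcases Nat.eq_zero_or_pos rN with h | h
        · simp only [hszdef, if_pos h]; omega
        · simp only [hszdef, if_neg (by omega : ¬ rN = 0)]; omega
      have hdiv : (n - sz) / mm = b := by
        rw [hn2, Nat.mul_add_div hmm, Nat.div_eq_of_lt (by omega), Nat.add_zero]
      have hmod2 : (n - sz) % mm = rN - 1 := by
        rw [hn2, Nat.mul_add_mod, Nat.mod_eq_of_lt (by omega)]
      have hmle : mm ≤ n - sz := by
        have : mm * 1 ≤ mm * b := Nat.mul_le_mul_left _ hb1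
        have h1 : mm * 1 = mm := by ring
        omega
      rw [ih (items.drop sz) hmm (by omega)]
      rw [List.range_succ_eq_map]
      simp only [List.map_cons, List.map_map, hrest, hdiv, hmod2]
      congr 1
      · -- first chunk
        have hfe : b + (if (0:Nat) < rN then 1 else 0) = sz := by
          rw [hszdef]; split_ifs <;> omega
        simp [hfe]
      · -- remaining chunks, pointwise
        apply List.map_congr_left
        intro j hj
        rw [List.mem_range] at hj
        simp only [Function.comp, Nat.succ_eq_add_one]
        rw [List.drop_drop]
        have hjm : (j + 1) * b = j * b + b := by ring
        have hd : sz + (j * b + min j (rN - 1)) = (j + 1) * b + min (j + 1) rN := by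
          rw [hjm, hszdef]; split_ifs <;> omega
        have ht : (if j < rN - 1 then (1:Nat) else 0) = (if j + 1 < rN then 1 else 0) := by
          split_ifs with h1 h2 <;> first | rfl | omega
        rw [hd, ht]

-- ===== VERDICT (by name: the statement is the Claim_ definition above) =====
theorem split_tasks_among_workers_spec : Claim_equal_split_tasks_among_workers := by
  intro tasks num_workers _
  unfold Spec_split_tasks_among_workers split_tasks_among_workers split_tasks_among_workers_alt
  by_cases h0 : tasks = []
  · simp [h0]
  · have h0' : ¬ ((tasks.length : Int) = 0) := by
      simp [List.length_eq_zero_iff]; exact h0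
    simp only [h0, h0', if_false]
    by_cases h1 : num_workers ≤ 1
    · simp [h1]
    · simp only [h1, if_false]
      set n := tasks.length with hn
      set ew := min num_workers (n : Int) with hew
      have hnpos : 0 < n := List.length_pos_iff.mpr h0
      have hewpos : 0 < ew := by
        have : (1:Int) ≤ (n : Int) := by exact_mod_cast hnpos
        omega
      set k := ew.toNat with hk
      have hewk : ew = (k : Int) := by omega
      have hkpos : 0 < k := by omega
      have hkn : k ≤ n := by
        have : ew ≤ (n : Int) := min_le_right _ _
        omega
      have hbase : PySem.Int.floordiv ((n : Nat) : Int) ((k : Nat) : Int) = ((n / k : Nat) : Int) := by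
        exact_mod_cast PySem.Int.floordiv_natCast n k
      have hrem : PySem.Int.mod ((n : Nat) : Int) ((k : Nat) : Int) = ((n % k : Nat) : Int) := by
        exact_mod_cast PySem.Int.mod_natCast n k
      -- A's fold = closed pyRange form
      have hA := pv_foldl_chunks tasks ((n / k : Nat) : Int) ((n % k : Nat) : Int) k 0 []
      rw [show ((0:Int) + (k : Nat)) = (k : Int) by omega] at hA
      rw [show (0:Int) * ((n / k : Nat) : Int) + min 0 ((n % k : Nat) : Int) = 0 by
        have := Int.natCast_nonneg (n % k); omega] at hA
      simp only [List.nil_append] at hA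
      simp only [hewk, hbase, hrem]
      rw [hA]
      -- B = the same closed form, via the greedy lemma
      rw [pv_greedy k tasks hkpos hkn]
      rw [PySem.List.pyRange_one 0 (k : Int)]
      rw [show ((k : Int) - 0).toNat = k by omega]
      rw [List.map_map]
      apply List.map_congr_left
      intro j hj
      rw [List.mem_range] at hj
      simp only [Function.comp, zero_add]
      rw [show ((j : Nat) : Int) * ((n / k : Nat) : Int) + min ((j : Nat) : Int) ((n % k : Nat) : Int)
            = ((j * (n / k) + min j (n % k) : Nat) : Int) by push_cast; ring,
          show (((j : Nat) : Int) + 1) * ((n / k : Nat) : Int) + min (((j : Nat) : Int) + 1) ((n % k : Nat) : Int)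
            = (((j + 1) * (n / k) + min (j + 1) (n % k) : Nat) : Int) by push_cast; ring]
      rw [PySem.List.slice_natCast]
      rw [← hn]
      congr 1
      have key : (j + 1) * (n / k) + min (j + 1) (n % k)
          = (n / k + if j < n % k then 1 else 0) + (j * (n / k) + min j (n % k)) := by
        have hmul : (j + 1) * (n / k) = j * (n / k) + n / k := by ring
        rw [hmul]; split_ifs <;> omega
      rw [key, Nat.add_sub_cancel]
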